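-- pv_equiv track=rewrite | github.com/kevoreilly/CAPEv2 | lib/cuckoo/common/utils.py | get_user_filename
-- ===== SOURCE A (Python) =====
-- def get_user_filename(options, customs):
--     opt_filename = ""
--     for block in (options, customs):
--         for pattern in ("filename=", "file_name=", "name="):
--             if pattern in block:
--                 for option in block.split(","):
--                     if option.startswith(pattern):
--                         opt_filename = option.split(pattern)[1]
--                         break
--                 if opt_filename:
--                     break
--         if opt_filename:
--             break
--
--     return opt_filename
-- ===== SOURCE B (Python) =====
-- def get_user_filename(options, customs):
--     # Build a key->option index per block once, then probe the three patterns.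
--     for block in (options, customs):
--         parsed = {}
--         for option in block.split(","):
--             if "=" in option:
--                 parsed.setdefault(option.split("=")[0] + "=", option)
--         for pattern in ("filename=", "file_name=", "name="):
--             option = parsed.get(pattern)
--             if option is not None:
--                 value = option.split(pattern)[1]
--                 if value:
--                     return value
--     return ""
-- ===== Notes on version B (the rewrite author's own statement) =====
-- stated objective: idiomatic
-- what changed: B builds, once per block, a dict indexing each '='-carrying option by its key (text before the first '=' plus '='), then answers the three patterns by O(1) dict lookups, instead of A's per-pattern substring test and re-scan of the comma-split option list.
import Mathlib
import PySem

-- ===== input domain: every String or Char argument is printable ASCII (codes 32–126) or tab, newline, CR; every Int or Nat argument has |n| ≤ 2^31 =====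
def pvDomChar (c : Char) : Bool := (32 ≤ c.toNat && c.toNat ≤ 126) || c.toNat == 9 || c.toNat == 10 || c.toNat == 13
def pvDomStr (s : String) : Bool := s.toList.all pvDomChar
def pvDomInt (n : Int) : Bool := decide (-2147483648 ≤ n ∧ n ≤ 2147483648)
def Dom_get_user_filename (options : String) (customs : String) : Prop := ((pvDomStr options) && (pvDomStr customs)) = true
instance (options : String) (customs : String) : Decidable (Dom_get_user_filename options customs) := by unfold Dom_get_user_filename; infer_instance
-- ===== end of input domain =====

-- B replaces A's per-pattern substring test and re-scan of the comma-split options with one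
-- key->option dict built per block plus three dict lookups (idiomatic index-then-probe).

-- ===== PORT A =====
-- inner 'for option in block.split(","): if option.startswith(pattern): opt_filename = option.split(pattern)[1]; break'
def pvFindOptA (pattern : String) : List String → String → String
  | [], acc => acc
  | o :: rest, acc =>
    if PySem.Str.startswith o pattern then
      -- option.split(pattern)[1]: the index always exists here because o starts with pattern
      (PySem.List.pyGet? ((PySem.Str.split? o pattern).getD []) 1).getD ""
    else pvFindOptA pattern rest acc

-- 'for pattern in (...)' with the running opt_filename accumulator and the 'if opt_filename: break'
def pvPatternLoopA (block : String) : List String → String → String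
  | [], acc => acc
  | p :: ps, acc =>
    let acc' := if PySem.Str.isIn p block
      then pvFindOptA p ((PySem.Str.split? block ",").getD []) acc
      else acc
    if acc' = "" then pvPatternLoopA block ps acc' else acc'

def get_user_filename (options : String) (customs : String) : String :=
  let acc := pvPatternLoopA options ["filename=", "file_name=", "name="] ""
  if acc = "" then pvPatternLoopA customs ["filename=", "file_name=", "name="] acc else acc

-- ===== PORT B =====
-- loop body: if "=" in option: parsed.setdefault(option.split("=")[0] + "=", option)
def pvAddOptB (d : PySem.Dict String String) (o : String) : PySem.Dict String String :=
  if PySem.Str.isIn "=" o then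
    match (PySem.Str.split? o "=").getD [] with
    | k :: _ => d.setdefault (k ++ "=") o
    | [] => d   -- unreachable: str.split with a nonempty separator returns at least one piece
  else d

def pvIndexB (opts : List String) : PySem.Dict String String :=
  opts.foldl pvAddOptB PySem.Dict.empty

-- 'for pattern in (...)': parsed.get(pattern), then return option.split(pattern)[1] if truthy
def pvProbeB (d : PySem.Dict String String) : List String → Option String
  | [] => none
  | p :: ps =>
    match d.get? p with
    | some o =>
      let v := (PySem.List.pyGet? ((PySem.Str.split? o p).getD []) 1).getD ""
      if v = "" then pvProbeB d ps else some v
    | none => pvProbeB d ps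

def pvBlockB (block : String) : Option String :=
  pvProbeB (pvIndexB ((PySem.Str.split? block ",").getD [])) ["filename=", "file_name=", "name="]

def get_user_filename_alt (options : String) (customs : String) : String :=
  match pvBlockB options with
  | some v => v
  | none =>
    match pvBlockB customs with
    | some v => v
    | none => ""

-- ===== PRECONDITION & SPEC =====
def Spec_get_user_filename (options : String) (customs : String) (out : String) : Prop := out = get_user_filename_alt options customs
instance (options : String) (customs : String) (out : String) : Decidable (Spec_get_user_filename options customs out) := by unfold Spec_get_user_filename; infer_instance

-- ===== CLAIM (what is proved, stated in full; the proofs are below) =====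
def Claim_equal_get_user_filename : Prop := ∀ (options : String) (customs : String), Dom_get_user_filename options customs → Spec_get_user_filename options customs (get_user_filename options customs)

-- ===== LEMMAS AND PROOFS =====

-- every piece produced by splitOn.go is either already in acc or an infix of cur.reverse ++ l
theorem pvGo_mem (sep : List Char) : ∀ (fuel : Nat) (l cur : List Char) (acc : List (List Char)) (o : List Char), o ∈ PySem.Chars.splitOn.go sep fuel l cur acc → o ∈ acc ∨ o <:+: cur.reverse ++ l := by
  intro fuel
  induction fuel with
  | zero =>
    intro l cur acc o h
    rw [PySem.Chars.splitOn.go.eq_def] at h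
    simp only [List.mem_reverse, List.mem_cons] at h
    rcases h with h | h
    · exact Or.inr (h ▸ List.infix_refl _)
    · exact Or.inl h
  | succ fuel ih =>
    intro l cur acc o h
    rw [PySem.Chars.splitOn.go.eq_def] at h
    match l with
    | [] =>
      simp only [List.mem_reverse, List.mem_cons] at h
      rcases h with h | h
      · subst h; exact Or.inr ⟨[], [], by simp⟩
      · exact Or.inl h
    | c :: rest =>
      simp only at h
      by_cases hpre : sep.isPrefixOf (c :: rest) = true
      · rw [if_pos hpre] at h
        rcases ih _ _ _ _ h with h | h
        · rcases List.mem_cons.mp h with h | h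
          · subst h; exact Or.inr ⟨[], c :: rest, by simp⟩
          · exact Or.inl h
        · right
          simp only [List.reverse_nil, List.nil_append] at h
          exact h.trans ((List.drop_suffix _ _).trans (List.suffix_append _ _)).isInfix
      · rw [if_neg hpre] at h
        rcases ih _ _ _ _ h with h | h
        · exact Or.inl h
        · right
          simpa [List.append_assoc] using h

-- every piece of a split is an infix of the split string
theorem pvSplitOn_mem_infix (s sep o : List Char) (h : o ∈ PySem.Chars.splitOn s sep) : o <:+: s := by
  unfold PySem.Chars.splitOn at h
  rcases pvGo_mem sep _ _ _ _ _ h with h | h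
  · simp at h
  · simpa using h

-- the first piece of a split on '=' is the maximal '='-free prefix
theorem pvGo_head : ∀ (fuel : Nat) (l cur : List Char) (acc : List (List Char)), l.length < fuel → ∃ rest, PySem.Chars.splitOn.go ['='] fuel l cur acc = acc.reverse ++ (cur.reverse ++ l.takeWhile (fun c => c != '=')) :: rest := by
  intro fuel
  induction fuel with
  | zero => intro l cur acc h; omega
  | succ fuel ih =>
    intro l cur acc hlen
    rw [PySem.Chars.splitOn.go.eq_def]
    match l with
    | [] =>
      exact ⟨[], by simp⟩
    | c :: rest =>
      simp only
      by_cases hc : c = '='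
      · subst hc
        rw [if_pos (by simp [List.isPrefixOf])]
        obtain ⟨r, hr⟩ := ih (List.drop 1 ('=' :: rest)) [] (cur.reverse :: acc) (by simp at hlen ⊢; omega)
        refine ⟨List.takeWhile (fun c => c != '=') rest :: r, ?_⟩
        simp only [List.length_cons, List.length_nil, List.drop] at hr ⊢
        rw [hr]
        simp [List.takeWhile]
      · rw [if_neg (by simp [List.isPrefixOf]; exact fun h => hc h.symm)]
        obtain ⟨r, hr⟩ := ih rest (c :: cur) acc (by simp at hlen ⊢; omega)
        refine ⟨r, ?_⟩
        rw [hr]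
        have hb : (c != '=') = true := by simpa using hc
        simp [List.takeWhile, hb]

theorem pvSplitOn_head (o : List Char) : ∃ rest, PySem.Chars.splitOn o ['='] = (o.takeWhile (fun c => c != '=')) :: rest := by
  obtain ⟨r, hr⟩ := pvGo_head (o.length + 1) o [] [] (by omega)
  exact ⟨r, by simpa using hr⟩

-- 'the key of o (text before the first '=') is cs' means exactly 'o starts with cs ++ ['=']'
theorem pvKey_iff (o cs : List Char) (hcs : '=' ∉ cs) : ('=' ∈ o ∧ o.takeWhile (fun c => c != '=') = cs) ↔ (cs ++ ['=']) <+: o := by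
  constructor
  · rintro ⟨hmem, htw⟩
    have hsplit := List.takeWhile_append_dropWhile (p := fun c => c != '=') (l := o)
    set dw := o.dropWhile (fun c => c != '=') with hdw
    have hne : dw ≠ [] := by
      intro hnil
      rw [← hsplit, hnil, List.append_nil] at hmem
      exact hcs (htw ▸ hmem)
    have hhead : ((dw.head hne) != '=') = false := List.head_dropWhile_not _ hne
    have hhead' : dw.head hne = '=' := by simpa using hhead
    refine ⟨dw.tail, ?_⟩
    rw [← hsplit, htw, List.append_assoc]
    congr 1
    show '=' :: dw.tail = dw
    conv_rhs => rw [← List.cons_head_tail hne]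
    rw [hhead']
  · rintro ⟨r, hr⟩
    subst hr
    refine ⟨by simp, ?_⟩
    rw [List.append_assoc, List.takeWhile_append_of_pos]
    · simp
    · intro c hc
      simp only [bne_iff_ne, ne_eq]
      exact fun h => hcs (h ▸ hc)

-- bridge: the String-level split against a one-char separator is Chars.splitOn
theorem pvSplit_map (s sep : String) (c : Char) (hsep : sep.toList = [c]) : ((PySem.Str.split? s sep).getD []).map String.toList = PySem.Chars.splitOn s.toList [c] := by
  have h := PySem.Str.split?_map s sep
  rw [hsep, PySem.Chars.split?] at h
  simp only [List.isEmpty_cons, Bool.false_eq_true, if_false] at h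
  cases hs : PySem.Str.split? s sep with
  | none => rw [hs] at h; simp at h
  | some L => rw [hs] at h; simpa using h

-- effect of one loop iteration of B's index build on the lookup of a pattern p = cs ++ "="
theorem pvStep_get? (p : String) (cs : List Char) (hp : p.toList = cs ++ ['=']) (hcs : '=' ∉ cs) (d : PySem.Dict String String) (o : String) : (pvAddOptB d o).get? p = if PySem.Str.startswith o p then some ((d.get? p).getD o) else d.get? p := by
  have hsw : PySem.Str.startswith o p = true ↔ (cs ++ ['=']) <+: o.toList := by
    rw [PySem.Str.startswith_eq, ← hp]
    exact PySem.Chars.startswith_iff _ _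
  unfold pvAddOptB
  by_cases hin : PySem.Str.isIn "=" o = true
  · rw [if_pos hin]
    have hmem : '=' ∈ o.toList := by
      have := (PySem.Str.isIn_iff_infix "=" o).mp hin
      simpa [List.singleton_infix_iff] using this
    obtain ⟨rest, hsp⟩ := pvSplitOn_head o.toList
    have hmap := pvSplit_map o "=" '=' rfl
    rw [hsp] at hmap
    cases hL : (PySem.Str.split? o "=").getD [] with
    | nil => rw [hL] at hmap; simp at hmap
    | cons k L' =>
      rw [hL] at hmap
      simp only [List.map_cons, List.cons.injEq] at hmap
      obtain ⟨hk, -⟩ := hmap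
      simp only
      by_cases htw : o.toList.takeWhile (fun c => c != '=') = cs
      · have hkey : k ++ "=" = p := by
          apply String.toList_inj.mp
          rw [String.toList_append, hk, htw, hp]
          rfl
        have hswt : PySem.Str.startswith o p = true :=
          hsw.mpr ((pvKey_iff o.toList cs hcs).mp ⟨hmem, htw⟩)
        rw [hkey, hswt, if_pos rfl, PySem.Dict.get?_setdefault_self]
      · have hkey : p ≠ k ++ "=" := by
          intro h
          apply htw
          have : p.toList = (k ++ "=").toList := by rw [h]
          rw [hp, String.toList_append, hk] at this
          exact (List.append_cancel_right this.symm)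
        have hswf : PySem.Str.startswith o p = false := by
          rw [Bool.eq_false_iff]
          intro hswt
          exact htw ((pvKey_iff o.toList cs hcs).mpr (hsw.mp hswt)).2
        rw [hswf, if_neg (by simp), PySem.Dict.get?_setdefault_of_ne _ _ hkey]
  · rw [if_neg hin]
    have hswf : PySem.Str.startswith o p = false := by
      rw [Bool.eq_false_iff]
      intro hswt
      apply hin
      rw [PySem.Str.isIn_iff_infix]
      have : '=' ∈ o.toList := (hsw.mp hswt).subset (by simp)
      simpa [List.singleton_infix_iff] using this
    rw [hswf, if_neg (by simp)]

-- B's dict lookup of a pattern is the first option starting with it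
theorem pvFold_get? (p : String) (cs : List Char) (hp : p.toList = cs ++ ['=']) (hcs : '=' ∉ cs) : ∀ (opts : List String) (d : PySem.Dict String String), (opts.foldl pvAddOptB d).get? p = (d.get? p).or (opts.find? (fun o => PySem.Str.startswith o p)) := by
  intro opts
  induction opts with
  | nil => intro d; simp
  | cons o rest ih =>
    intro d
    rw [List.foldl_cons, ih, pvStep_get? p cs hp hcs]
    by_cases hsw : PySem.Str.startswith o p = true
    · rw [if_pos hsw, show List.find? (fun o => PySem.Str.startswith o p) (o :: rest) = some o from List.find?_cons_of_pos hsw]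
      cases d.get? p <;> simp
    · rw [if_neg hsw, show List.find? (fun o => PySem.Str.startswith o p) (o :: rest) = List.find? (fun o => PySem.Str.startswith o p) rest from List.find?_cons_of_neg hsw]

theorem pvIndex_get? (p : String) (cs : List Char) (hp : p.toList = cs ++ ['=']) (hcs : '=' ∉ cs) (opts : List String) : (pvIndexB opts).get? p = opts.find? (fun o => PySem.Str.startswith o p) := by
  unfold pvIndexB
  rw [pvFold_get? p cs hp hcs]
  rfl

-- A's inner option scan is a find?
theorem pvFindOptA_eq (p : String) (opts : List String) (acc : String) : pvFindOptA p opts acc = match opts.find? (fun o => PySem.Str.startswith o p) with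
    | some o => (PySem.List.pyGet? ((PySem.Str.split? o p).getD []) 1).getD ""
    | none => acc := by
  induction opts with
  | nil => rfl
  | cons o rest ih =>
    rw [pvFindOptA]
    by_cases hsw : PySem.Str.startswith o p = true
    · rw [if_pos hsw, show List.find? (fun o => PySem.Str.startswith o p) (o :: rest) = some o from List.find?_cons_of_pos hsw]
    · rw [if_neg hsw, show List.find? (fun o => PySem.Str.startswith o p) (o :: rest) = List.find? (fun o => PySem.Str.startswith o p) rest from List.find?_cons_of_neg hsw, ih]

-- A's 'pattern in block' guard is exact: no piece of the split starts with an absent pattern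
theorem pvGuard_none (p block : String) (h : PySem.Str.isIn p block = false) : ((PySem.Str.split? block ",").getD []).find? (fun o => PySem.Str.startswith o p) = none := by
  rw [List.find?_eq_none]
  intro o ho hsw
  have hmem : o.toList ∈ PySem.Chars.splitOn block.toList [','] := by
    rw [← pvSplit_map block "," ',' rfl]
    exact List.mem_map_of_mem ho
  have hinf : o.toList <:+: block.toList := pvSplitOn_mem_infix _ _ _ hmem
  have hpre : p.toList <+: o.toList := by
    rw [PySem.Str.startswith_eq] at hsw
    exact (PySem.Chars.startswith_iff _ _).mp hsw
  have : PySem.Str.isIn p block = true := by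
    rw [PySem.Str.isIn_iff_infix]
    exact hpre.isInfix.trans hinf
  rw [this] at h
  exact Bool.noConfusion h

-- B only ever returns a truthy (nonempty) value
theorem pvProbe_ne (d : PySem.Dict String String) (ps : List String) (v : String) (h : pvProbeB d ps = some v) : v ≠ "" := by
  induction ps with
  | nil => simp [pvProbeB] at h
  | cons p ps ih =>
    rw [pvProbeB] at h
    cases hd : d.get? p with
    | some o =>
      rw [hd] at h
      simp only at h
      by_cases hv : (PySem.List.pyGet? ((PySem.Str.split? o p).getD []) 1).getD "" = ""
      · rw [if_pos hv] at h
        exact ih h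
      · rw [if_neg hv] at h
        exact (Option.some.injEq _ _ ▸ h) ▸ hv
    | none =>
      rw [hd] at h
      exact ih h

-- per-block equivalence: A's pattern loop computes B's dict probe
theorem pvBlock_eq (block : String) (ps : List String) (hps : ∀ p ∈ ps, ∃ cs, p.toList = cs ++ ['='] ∧ '=' ∉ cs) : pvPatternLoopA block ps "" = (pvProbeB (pvIndexB ((PySem.Str.split? block ",").getD [])) ps).getD "" := by
  induction ps with
  | nil => rfl
  | cons p ps ih =>
    obtain ⟨cs, hp, hcs⟩ := hps p (by simp)
    have ihr := ih (fun q hq => hps q (by simp [hq]))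
    rw [pvPatternLoopA, pvProbeB]
    rw [pvIndex_get? p cs hp hcs]
    cases hf : ((PySem.Str.split? block ",").getD []).find? (fun o => PySem.Str.startswith o p) with
    | none =>
      have hacc : (if PySem.Str.isIn p block then pvFindOptA p ((PySem.Str.split? block ",").getD []) "" else "") = "" := by
        by_cases hin : PySem.Str.isIn p block = true
        · rw [if_pos hin, pvFindOptA_eq, hf]
        · rw [if_neg hin]
      simp only [hacc]
      exact ihr
    | some o =>
      have hsw : PySem.Str.startswith o p = true := by
        have := List.find?_some (p := fun o => PySem.Str.startswith o p) hf
        simpa using this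
      have hin : PySem.Str.isIn p block = true := by
        by_contra hin
        rw [pvGuard_none p block (Bool.eq_false_iff.mpr hin)] at hf
        simp at hf
      have hval : (if PySem.Str.isIn p block then pvFindOptA p ((PySem.Str.split? block ",").getD []) "" else "") = (PySem.List.pyGet? ((PySem.Str.split? o p).getD []) 1).getD "" := by
        rw [if_pos hin, pvFindOptA_eq, hf]
      rw [hval]
      simp only
      by_cases hv : (PySem.List.pyGet? ((PySem.Str.split? o p).getD []) 1).getD "" = ""
      · rw [if_pos hv, if_pos hv, hv]
        exact ihr
      · rw [if_neg hv, if_neg hv]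
        rfl

theorem pvPatterns_shape : ∀ p ∈ (["filename=", "file_name=", "name="] : List String), ∃ cs, p.toList = cs ++ ['='] ∧ '=' ∉ cs := by
  intro p hp
  simp only [List.mem_cons, List.not_mem_nil, or_false] at hp
  rcases hp with h | h | h
  all_goals subst h
  · exact ⟨['f','i','l','e','n','a','m','e'], by decide, by decide⟩
  · exact ⟨['f','i','l','e','_','n','a','m','e'], by decide, by decide⟩
  · exact ⟨['n','a','m','e'], by decide, by decide⟩

-- ===== VERDICT (by name: the statement is the Claim_ definition above) =====
theorem get_user_filename_spec : Claim_equal_get_user_filename := by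
  unfold Claim_equal_get_user_filename
  intro options customs _
  unfold Spec_get_user_filename get_user_filename get_user_filename_alt pvBlockB
  have h1 := pvBlock_eq options _ pvPatterns_shape
  have h2 := pvBlock_eq customs _ pvPatterns_shape
  cases hb1 : pvProbeB (pvIndexB ((PySem.Str.split? options ",").getD [])) ["filename=", "file_name=", "name="] with
  | some v =>
    have hv := pvProbe_ne _ _ _ hb1
    rw [hb1] at h1
    simp only [Option.getD_some] at h1
    simp [h1, hv]
  | none =>
    rw [hb1] at h1
    simp only [Option.getD_none] at h1
    simp only [h1, reduceIte]
    cases hb2 : pvProbeB (pvIndexB ((PySem.Str.split? customs ",").getD [])) ["filename=", "file_name=", "name="] with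
    | some v =>
      have hv := pvProbe_ne _ _ _ hb2
      rw [hb2] at h2
      simp only [Option.getD_some] at h2
      simp [h2]
    | none =>
      rw [hb2] at h2
      simp only [Option.getD_none] at h2
      simp [h2]
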